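-- pv_equiv track=rewrite | github.com/JohnArrowwood/coding-challenges | hacker-rank/challenges/jumping-on-the-clouds/v2_backwards.py | v1_backwards
-- ===== SOURCE A (Python) =====
-- is_thundercloud = lambda cloud: cloud == 1
--
-- def v1_backwards(clouds):
--
--     cloud = len(clouds)-1 # the cloud we are working back from
--     start = 0
--     jumps = 0
--
--     while cloud > start:
--
--         intended = cloud - 2
--
--         if intended < start or is_thundercloud( clouds[intended] ):
--             intended = cloud - 1
--
--         cloud = intended
--
--         jumps += 1
--
--     return jumps
-- ===== SOURCE B (Python) =====
-- def v1_backwards(clouds):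
--     # Bottom-up DP with O(1) state: cost to reach cloud i from cloud 0,
--     # where a 2-jump over position i-2 is allowed only from a non-thundercloud.
--     n = len(clouds)
--     if n <= 1:
--         return 0
--     prev2, prev = 0, 1  # dp[0], dp[1]
--     for i in range(2, n):
--         cur = prev + 1
--         if clouds[i - 2] != 1:
--             cur = min(cur, prev2 + 1)
--         prev2, prev = prev, cur
--     return prev
-- ===== Notes on version B (the rewrite author's own statement) =====
-- stated objective: alternative
-- what changed: Replaces A's backward greedy walk from the last cloud with a forward bottom-up dynamic program that carries the two previous minimum-jump counts in O(1) state.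
import Mathlib
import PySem

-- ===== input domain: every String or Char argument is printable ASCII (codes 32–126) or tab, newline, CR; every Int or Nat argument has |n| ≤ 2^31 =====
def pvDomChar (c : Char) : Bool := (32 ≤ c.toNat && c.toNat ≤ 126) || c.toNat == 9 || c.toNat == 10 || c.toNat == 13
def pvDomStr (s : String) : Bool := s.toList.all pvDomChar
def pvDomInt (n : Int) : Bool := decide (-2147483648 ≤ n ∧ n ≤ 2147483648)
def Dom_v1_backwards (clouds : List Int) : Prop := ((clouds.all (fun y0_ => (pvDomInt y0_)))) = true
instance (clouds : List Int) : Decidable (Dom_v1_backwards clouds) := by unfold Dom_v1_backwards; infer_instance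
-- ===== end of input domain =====

-- B replaces A's backward greedy walk with a forward O(1)-state dynamic program; same minimum jump count (objective: alternative).

-- ===== PORT A =====
-- while cloud > start: intended = cloud-2; if intended < start or clouds[intended] == 1: intended = cloud-1
-- (the index is only read when intended ≥ 0, and then it is in range, so the getD default is never used)
def v1_backwardsLoop (clouds : List Int) (cloud : Int) (jumps : Int) : Int :=
  if h : cloud > 0 then
    let intended := cloud - 2
    let intended :=
      if intended < 0 ∨ (PySem.List.pyGet? clouds intended).getD 0 = 1 then cloud - 1 else intended
    v1_backwardsLoop clouds intended (jumps + 1)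
  else jumps
termination_by cloud.toNat
decreasing_by
  split <;> omega

def v1_backwards (clouds : List Int) : Int :=
  v1_backwardsLoop clouds ((clouds.length : Int) - 1) 0

-- ===== PORT B =====
-- forward DP over range(2, n) carrying (dp[i-2], dp[i-1])
def v1_backwards_alt (clouds : List Int) : Int :=
  let n := clouds.length
  if n ≤ 1 then 0
  else
    let st := (PySem.List.pyRange 2 (n : Int) 1).foldl
      (fun (s : Int × Int) i =>
        let cur := s.2 + 1
        let cur := if (PySem.List.pyGet? clouds (i - 2)).getD 0 ≠ 1 then min cur (s.1 + 1) else cur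
        (s.2, cur)) (0, 1)
    st.2

-- ===== PRECONDITION & SPEC =====
def Spec_v1_backwards (clouds : List Int) (out : Int) : Prop := out = v1_backwards_alt clouds
instance (clouds : List Int) (out : Int) : Decidable (Spec_v1_backwards clouds out) := by unfold Spec_v1_backwards; infer_instance

-- ===== CLAIM (what is proved, stated in full; the proofs are below) =====
def Claim_equal_v1_backwards : Prop := ∀ (clouds : List Int), Dom_v1_backwards clouds → Spec_v1_backwards clouds (v1_backwards clouds)

-- ===== LEMMAS AND PROOFS =====

-- dp value: minimum jumps from cloud 0 to cloud i (a 2-jump from p allowed when clouds[p] ≠ 1)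
def g (clouds : List Int) : Nat → Int
  | 0 => 0
  | 1 => 1
  | (i+2) =>
    if (PySem.List.pyGet? clouds (i : Int)).getD 0 = 1 then g clouds (i+1) + 1
    else min (g clouds (i+1) + 1) (g clouds i + 1)

lemma g_zero (clouds : List Int) : g clouds 0 = 0 := rfl
lemma g_one (clouds : List Int) : g clouds 1 = 1 := rfl
lemma g_two (clouds : List Int) (i : Nat) :
    g clouds (i+2) =
      if (PySem.List.pyGet? clouds (i : Int)).getD 0 = 1 then g clouds (i+1) + 1
      else min (g clouds (i+1) + 1) (g clouds i + 1) := rfl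

lemma g_le_succ (clouds : List Int) : ∀ i, g clouds (i+1) ≤ g clouds i + 1
  | 0 => by simp [g_zero, g_one]
  | (i+1) => by
    rw [show i+1+1 = i+2 from rfl, g_two]
    split
    · omega
    · simp only [min_le_iff]; omega

lemma g_mono (clouds : List Int) : ∀ i, g clouds i ≤ g clouds (i+1)
  | 0 => by simp [g_zero, g_one]
  | (i+1) => by
    rw [show i+1+1 = i+2 from rfl, g_two]
    have := g_le_succ clouds i
    split
    · omega
    · simp only [le_min_iff]; omega

lemma loop_eq_g (clouds : List Int) : ∀ c j, v1_backwardsLoop clouds (c : Nat) j = j + g clouds c := by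
  intro c
  induction c using Nat.strong_induction_on with
  | _ c ih =>
    intro j
    match c with
    | 0 => rw [v1_backwardsLoop]; simp [g_zero]
    | 1 =>
      rw [v1_backwardsLoop]
      norm_num
      rw [v1_backwardsLoop]
      simp [g_one]
    | (c+2) =>
      rw [v1_backwardsLoop]
      simp only [dif_pos (by push_cast; omega : ((c+2:Nat):Int) > 0)]
      have harg : ((c+2:Nat):Int) - 2 = (c:Int) := by push_cast; omega
      rw [harg]
      have hneg : ¬ ((c:Int) < 0) := by omega
      by_cases hth : (PySem.List.pyGet? clouds (c:Int)).getD 0 = 1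
      · simp only [hneg, hth, false_or, if_true]
        rw [show ((c+2:Nat):Int) - 1 = ((c+1:Nat):Int) by push_cast; omega]
        rw [ih (c+1) (by omega), g_two, if_pos hth]
        omega
      · simp only [hneg, hth, or_false, if_false]
        rw [ih c (by omega), g_two, if_neg hth]
        have := g_mono clouds c
        omega

lemma bfold_eq_g (clouds : List Int) : ∀ k : Nat,
    (PySem.List.pyRange 2 ((k:Int) + 2) 1).foldl
      (fun (s : Int × Int) i =>
        let cur := s.2 + 1
        let cur := if (PySem.List.pyGet? clouds (i - 2)).getD 0 ≠ 1 then min cur (s.1 + 1) else cur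
        (s.2, cur)) (0, 1) = (g clouds k, g clouds (k+1)) := by
  intro k
  induction k with
  | zero => rw [PySem.List.pyRange_one_eq_nil (by norm_num)]; simp [g_zero, g_one]
  | succ k ih =>
    rw [show ((k+1:Nat):Int) + 2 = ((k:Int) + 2) + 1 by push_cast; ring]
    rw [PySem.List.pyRange_one_succ_right (by omega)]
    rw [List.foldl_append, ih]
    simp only [List.foldl_cons, List.foldl_nil]
    have harg : (k:Int) + 2 - 2 = (k:Int) := by ring
    rw [harg]
    rw [show k+1+1 = k+2 from rfl, g_two]
    by_cases hth : (PySem.List.pyGet? clouds (k:Int)).getD 0 = 1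
    · simp only [hth, ne_eq, not_true_eq_false, if_false, if_true]
    · simp only [hth, ne_eq, not_false_eq_true, if_true, if_false]

-- ===== VERDICT (by name: the statement is the Claim_ definition above) =====
theorem v1_backwards_spec : Claim_equal_v1_backwards := by
  intro clouds _
  show v1_backwards clouds = v1_backwards_alt clouds
  unfold v1_backwards v1_backwards_alt
  match h : clouds.length with
  | 0 => rw [v1_backwardsLoop]; norm_num
  | 1 =>
    norm_num
    rw [v1_backwardsLoop]
    norm_num
  | (m+2) =>
    have hgt : ¬ (m + 2 ≤ 1) := by omega
    simp only [hgt, if_false]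
    rw [show ((m+2:Nat):Int) - 1 = ((m+1:Nat):Int) by push_cast; ring]
    rw [loop_eq_g]
    rw [show ((m+2:Nat):Int) = (m:Int) + 2 by push_cast; ring]
    rw [bfold_eq_g]
    norm_num
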